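-- pv_equiv track=rewrite | github.com/luizmont5/Exerc-cios-Computabilidade-e-Complexidade-de-algoritmo | 16 questão/exercicio16.py | afd_blocos_consecutivos_de_zeros
-- ===== SOURCE A (Python) =====
-- def afd_blocos_consecutivos_de_zeros(entrada):
--     estado_atual = 'q0'  # estado inicial
--     for i in range(1, len(entrada)):
--         if entrada[i] == '0' and entrada[i - 1] == '1':
--             estado_atual = 'q1'
--         if estado_atual == 'q1' and entrada[i] == '0':
--             return False
--
--     return True
-- ===== SOURCE B (Python) =====
-- def afd_blocos_consecutivos_de_zeros(entrada):
--     return '10' not in entrada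
-- ===== Notes on version B (the rewrite author's own statement) =====
-- stated objective: simpler
-- what changed: A's two same-iteration ifs mean it rejects exactly when a zero immediately follows a one, so B replaces the explicit per-index state loop with the single substring test '10' not in entrada.
import Mathlib
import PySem

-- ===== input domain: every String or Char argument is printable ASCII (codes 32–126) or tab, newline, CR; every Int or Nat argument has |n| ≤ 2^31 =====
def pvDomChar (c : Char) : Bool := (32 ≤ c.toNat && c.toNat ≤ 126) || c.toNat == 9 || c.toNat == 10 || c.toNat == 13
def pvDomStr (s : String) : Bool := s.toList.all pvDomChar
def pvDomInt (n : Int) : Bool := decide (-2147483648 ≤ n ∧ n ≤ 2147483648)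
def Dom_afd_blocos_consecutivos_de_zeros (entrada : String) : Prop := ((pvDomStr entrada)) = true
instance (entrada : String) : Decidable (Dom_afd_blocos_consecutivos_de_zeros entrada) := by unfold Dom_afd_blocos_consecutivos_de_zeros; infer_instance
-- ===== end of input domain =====

-- B replaces A's explicit per-index DFA loop with a single substring test ("10" not in entrada): simpler, same behaviour.


-- ===== PORT A =====
-- the for-loop of A: indices `is_`, mutable `estado_atual`; all indices are in range so pyGetD's default is never used
def pvALoop (cs : List Char) (is_ : List Int) (estado : String) : Bool :=
  match is_ with
  | [] => true
  | i :: rest =>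
    let estado' := if PySem.List.pyGetD cs i ' ' = '0' ∧ PySem.List.pyGetD cs (i - 1) ' ' = '1'
                   then "q1" else estado
    if estado' = "q1" ∧ PySem.List.pyGetD cs i ' ' = '0' then false
    else pvALoop cs rest estado'

def afd_blocos_consecutivos_de_zeros (entrada : String) : Bool :=
  pvALoop entrada.toList (PySem.List.pyRange 1 (PySem.Str.len entrada)) "q0"

-- ===== PORT B =====
def afd_blocos_consecutivos_de_zeros_alt (entrada : String) : Bool :=
  !(PySem.Str.isIn "10" entrada)

-- ===== PRECONDITION & SPEC =====
def Spec_afd_blocos_consecutivos_de_zeros (entrada : String) (out : Bool) : Prop := out = afd_blocos_consecutivos_de_zeros_alt entrada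
instance (entrada : String) (out : Bool) : Decidable (Spec_afd_blocos_consecutivos_de_zeros entrada out) := by unfold Spec_afd_blocos_consecutivos_de_zeros; infer_instance

-- ===== CLAIM (what is proved, stated in full; the proofs are below) =====
def Claim_equal_afd_blocos_consecutivos_de_zeros : Prop := ∀ (entrada : String), Dom_afd_blocos_consecutivos_de_zeros entrada → Spec_afd_blocos_consecutivos_de_zeros entrada (afd_blocos_consecutivos_de_zeros entrada)

-- ===== LEMMAS AND PROOFS =====

-- a plain pairwise scanner, the bridge between A's index loop and B's substring test
def pvScan : List Char → Bool
  | a :: b :: rest => if a = '1' ∧ b = '0' then false else pvScan (b :: rest)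
  | _ => true

lemma pvScan_short (cs : List Char) (h : cs.length ≤ 1) : pvScan cs = true := by
  match cs, h with
  | [], _ => rfl
  | [a], _ => rfl

lemma pvScan_eq_not_infix (cs : List Char) :
    pvScan cs = !decide (['1', '0'] <:+: cs) := by
  match cs with
  | [] => simp [pvScan]
  | [a] =>
    simp only [pvScan]
    rw [show (decide (['1','0'] <:+: [a]) = false) from by
      simp [List.infix_cons_iff, List.cons_prefix_cons]]
    rfl
  | a :: b :: rest =>
    have ih := pvScan_eq_not_infix (b :: rest)
    simp only [pvScan]
    by_cases h : a = '1' ∧ b = '0'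
    · obtain ⟨h1, h2⟩ := h
      subst h1; subst h2
      simp [List.infix_cons_iff, List.cons_prefix_cons]
    · rw [if_neg h, ih]
      have hiff : (['1', '0'] <:+: a :: b :: rest) ↔ (['1', '0'] <:+: b :: rest) := by
        rw [List.infix_cons_iff]
        constructor
        · rintro (hpre | hi)
          · rw [List.cons_prefix_cons] at hpre
            obtain ⟨h1, hpre⟩ := hpre
            rw [List.cons_prefix_cons] at hpre
            exact absurd ⟨h1.symm, hpre.1.symm⟩ h
          · exact hi
        · exact Or.inr
      simp only [hiff]

lemma pvALoop_eq_pvScan (cs : List Char) (n : Nat) :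
    ∀ k : Nat, 1 ≤ k → n = cs.length - k →
      pvALoop cs (PySem.List.pyRange (k : Int) (cs.length : Int)) "q0"
        = pvScan (cs.drop (k - 1)) := by
  induction n with
  | zero =>
    intro k hk hn
    have hge : cs.length ≤ k := by omega
    rw [PySem.List.pyRange_one_eq_nil (by exact_mod_cast hge)]
    rw [pvScan_short _ (by rw [List.length_drop]; omega)]
    rfl
  | succ m ih =>
    intro k hk hn
    have hlt : k < cs.length := by omega
    rw [PySem.List.pyRange_one_cons (by exact_mod_cast hlt)]
    have hk0 : PySem.List.pyGetD cs (k : Int) ' ' = cs[k] :=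
      PySem.List.pyGetD_eq_getElem cs ' ' (by positivity) (by exact_mod_cast hlt)
    have hk1 : PySem.List.pyGetD cs ((k : Int) - 1) ' ' = cs[k - 1] := by
      have hcast : (k : Int) - 1 = ((k - 1 : Nat) : Int) := by omega
      rw [hcast, PySem.List.pyGetD_eq_getElem cs ' ' (by positivity) (by exact_mod_cast (by omega : k - 1 < cs.length))]
      simp
    have hdrop1 : cs.drop (k - 1) = cs[k - 1] :: cs.drop k := by
      have hsucc : k - 1 + 1 = k := by omega
      rw [List.drop_eq_getElem_cons (by omega : k - 1 < cs.length), hsucc]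
    have hdrop2 : cs.drop k = cs[k] :: cs.drop (k + 1) := List.drop_eq_getElem_cons hlt
    rw [hdrop1, hdrop2]
    simp only [pvALoop, hk0, hk1]
    by_cases h : cs[k] = '0' ∧ cs[k - 1] = '1'
    · rw [if_pos h]
      simp [pvScan, h.1, h.2]
    · rw [if_neg h]
      have hno : ¬ (("q0" : String) = "q1" ∧ cs[k] = '0') := by
        rintro ⟨habs, -⟩; exact absurd habs (by decide)
      rw [if_neg hno]
      have hstep : ((k : Int) + 1) = ((k + 1 : Nat) : Int) := by push_cast; ring
      rw [hstep, ih (k + 1) (by omega) (by omega), show k + 1 - 1 = k from rfl, hdrop2]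
      simp only [pvScan]
      rw [if_neg (by rintro ⟨h1, h0⟩; exact h ⟨h0, h1⟩)]

-- ===== VERDICT (by name: the statement is the Claim_ definition above) =====
theorem afd_blocos_consecutivos_de_zeros_spec : Claim_equal_afd_blocos_consecutivos_de_zeros := by
  unfold Claim_equal_afd_blocos_consecutivos_de_zeros
  intro entrada _
  unfold Spec_afd_blocos_consecutivos_de_zeros afd_blocos_consecutivos_de_zeros
    afd_blocos_consecutivos_de_zeros_alt
  have hlen : PySem.Str.len entrada = (entrada.toList.length : Int) := by
    simp [PySem.Str.len_eq]
  have hmain := pvALoop_eq_pvScan entrada.toList (entrada.toList.length - 1) 1 (le_refl 1) rfl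
  simp only [Nat.cast_one, Nat.sub_self, List.drop_zero] at hmain
  rw [hlen, hmain, pvScan_eq_not_infix]
  cases hin : PySem.Str.isIn "10" entrada with
  | true =>
    have hI : ("10" : String).toList <:+: entrada.toList :=
      (PySem.Str.isIn_iff_infix "10" entrada).mp hin
    have hI' : ['1', '0'] <:+: entrada.toList := hI
    simp [hI']
  | false =>
    have hnI : ¬ (['1', '0'] <:+: entrada.toList) := by
      intro hI
      have := (PySem.Str.isIn_iff_infix "10" entrada).mpr hI
      rw [hin] at this
      exact Bool.false_ne_true this
    simp [hnI]
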